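-- pv_equiv track=rewrite | github.com/KaiyuKosanouvong/nssa221 | script_4/attacker_report.py | sortEntries
-- ===== SOURCE A (Python) =====
-- def sortEntries(entries): # manually sorts the list of entries from the log file based on count in ascending order
--     newEntries = []
--
--     for entry in entries: # add entries to newEntries (convert from dictionary to list)
--         ip = str(entry)
--         count = str(entries[entry])
--         newEntries.append([ip, count])
--
--     size = len(newEntries)
--     for i in range(size-1): # iterate through entries
--         for j in range(size-i-1):
--             if int(newEntries[j][1]) > int(newEntries[j+1][1]): # compare count values, check if new entry is greater than previous entry
--                 newEntries[j], newEntries[j+1] = newEntries[j+1], newEntries[j] # swap entries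
--
--     return newEntries
-- ===== SOURCE B (Python) =====
-- def sortEntries(entries): # B: build the rows with a comprehension, sort with the built-in stable sort
--     newEntries = [[str(ip), str(count)] for ip, count in entries.items()]
--     return sorted(newEntries, key=lambda e: int(e[1]))
-- ===== Notes on version B (the rewrite author's own statement) =====
-- stated objective: faster
-- what changed: Replaces the hand-written bubble sort (nested swap passes) with Python's built-in stable sort keyed on the parsed count, over a list comprehension.
import Mathlib
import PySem

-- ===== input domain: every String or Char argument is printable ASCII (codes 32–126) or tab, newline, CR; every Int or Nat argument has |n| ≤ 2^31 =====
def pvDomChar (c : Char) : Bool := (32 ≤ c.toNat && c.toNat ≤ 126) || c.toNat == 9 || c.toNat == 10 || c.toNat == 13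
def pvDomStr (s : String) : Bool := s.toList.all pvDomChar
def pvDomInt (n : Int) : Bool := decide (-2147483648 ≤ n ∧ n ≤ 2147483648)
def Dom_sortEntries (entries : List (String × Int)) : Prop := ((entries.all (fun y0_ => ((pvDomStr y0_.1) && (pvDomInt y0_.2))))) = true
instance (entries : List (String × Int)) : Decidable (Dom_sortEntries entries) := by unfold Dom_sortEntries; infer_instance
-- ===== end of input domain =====

-- B replaces A's hand-written bubble sort with Python's built-in stable sort keyed on the parsed count; equal output on every dict input.


-- ===== PORT A =====
-- int(e[1]) on a row e = [ip, str(count)]: index 1 always exists and the string always parses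
-- (rows are built as [str(ip), str(count)]), so the .getD defaults are unreachable.
def pvKeyA (e : List String) : Int := (PySem.Int.ofStr? (PySem.List.pyGetD e 1 "")).getD 0

-- one inner loop 'for j in range(bound)': k bounded compare-and-swap steps from the front
def pvBPass {α : Type} (f : α → Int) : Nat → List α → List α
  | 0, l => l
  | _+1, [] => []
  | _+1, [x] => [x]
  | k+1, x :: y :: t => if f y < f x then y :: pvBPass f k (x :: t) else x :: pvBPass f k (y :: t)

-- the outer loop 'for i in range(size-1)': passes with bounds m, m-1, …, 1
def pvGo {α : Type} (f : α → Int) : Nat → List α → List α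
  | 0, l => l
  | m+1, l => pvGo f m (pvBPass f (m+1) l)

def sortEntries (entries : List (String × Int)) : List (List String) :=
  -- first loop: newEntries.append([str(entry), str(entries[entry])]); iterating the dict
  -- pairs each key with its value (a dict's keys are distinct)
  let newEntries := entries.foldl (fun acc kv => acc ++ [[kv.1, PySem.Int.toStr kv.2]]) []
  pvGo pvKeyA (newEntries.length - 1) newEntries

-- ===== PORT B =====
def sortEntries_alt (entries : List (String × Int)) : List (List String) :=
  let newEntries := entries.map (fun kv => [kv.1, PySem.Int.toStr kv.2])
  PySem.List.sorted newEntries pvKeyA false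

-- ===== PRECONDITION & SPEC =====
def Spec_sortEntries (entries : List (String × Int)) (out : List (List String)) : Prop := out = sortEntries_alt entries
instance (entries : List (String × Int)) (out : List (List String)) : Decidable (Spec_sortEntries entries out) := by unfold Spec_sortEntries; infer_instance

-- ===== CLAIM (what is proved, stated in full; the proofs are below) =====
def Claim_equal_sortEntries : Prop := ∀ (entries : List (String × Int)), Dom_sortEntries entries → Spec_sortEntries entries (sortEntries entries)

-- ===== LEMMAS AND PROOFS =====

theorem pvBPass_perm {α : Type} (f : α → Int) : ∀ (k : Nat) (l : List α), (pvBPass f k l).Perm l := by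
  intro k
  induction k with
  | zero => intro l; rfl
  | succ k ih =>
    intro l
    match l with
    | [] => rfl
    | [x] => rfl
    | x :: y :: t =>
      rw [pvBPass]
      split_ifs with h
      · exact ((ih (x::t)).cons y).trans (List.Perm.swap x y t)
      · exact (ih (y::t)).cons x

theorem pvBPass_split {α : Type} (f : α → Int) : ∀ (k : Nat) (l : List α),
    pvBPass f k l = pvBPass f k (l.take (k+1)) ++ l.drop (k+1) := by
  intro k
  induction k with
  | zero => intro l; simp only [pvBPass]; exact (List.take_append_drop 1 l).symm
  | succ k ih =>
    intro l
    match l with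
    | [] => simp [pvBPass]
    | [x] => simp [pvBPass]
    | x :: y :: t =>
      simp only [List.take_succ_cons, List.drop_succ_cons]
      rw [pvBPass, pvBPass]
      split_ifs with h
      · rw [ih (x :: t)]
        simp [List.take_succ_cons, List.drop_succ_cons]
      · rw [ih (y :: t)]
        simp [List.take_succ_cons, List.drop_succ_cons]

theorem pvBPass_last {α : Type} (f : α → Int) : ∀ (k : Nat) (l : List α), l ≠ [] → l.length ≤ k + 1 →
    ∃ q mx, pvBPass f k l = q ++ [mx] ∧ ∀ z ∈ l, f z ≤ f mx := by
  intro k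
  induction k with
  | zero =>
    intro l hne hlen
    match l with
    | [x] => exact ⟨[], x, rfl, by simp⟩
  | succ k ih =>
    intro l hne hlen
    match l with
    | [x] => exact ⟨[], x, rfl, by simp⟩
    | x :: y :: t =>
      rw [pvBPass]
      split_ifs with h
      · obtain ⟨q, mx, heq, hall⟩ := ih (x :: t) (by simp) (by simpa using hlen)
        refine ⟨y :: q, mx, by simp [heq], ?_⟩
        intro z hz
        simp only [List.mem_cons] at hz
        rcases hz with hzx | hzy | hzt
        · exact hzx ▸ hall x (by simp)
        · exact hzy ▸ le_of_lt (lt_of_lt_of_le h (hall x (by simp)))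
        · exact hall z (by simp [hzt])
      · obtain ⟨q, mx, heq, hall⟩ := ih (y :: t) (by simp) (by simpa using hlen)
        refine ⟨x :: q, mx, by simp [heq], ?_⟩
        intro z hz
        simp only [List.mem_cons] at hz
        rcases hz with hzx | hz
        · exact hzx ▸ le_trans (not_lt.1 h) (hall y (by simp))
        · exact hall z (by simp [hz])

theorem pvBPass_pairwise {α : Type} (f : α → Int) {Q : α → α → Prop}
    (hQ : ∀ a b, f b < f a → Q b a) : ∀ (k : Nat) (l : List α),
    l.Pairwise Q → (pvBPass f k l).Pairwise Q := by
  intro k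
  induction k with
  | zero => intro l h; exact h
  | succ k ih =>
    intro l h
    match l with
    | [] => exact h
    | [x] => exact h
    | x :: y :: t =>
      rw [pvBPass]
      rcases List.pairwise_cons.1 h with ⟨hx, h'⟩
      rcases List.pairwise_cons.1 h' with ⟨hy, ht⟩
      split_ifs with hcmp
      · refine List.pairwise_cons.2 ⟨?_, ih (x :: t) (List.pairwise_cons.2 ⟨fun b hb => hx b (by simp [hb]), ht⟩)⟩
        intro b hb
        rw [(pvBPass_perm f k (x :: t)).mem_iff] at hb
        simp only [List.mem_cons] at hb
        rcases hb with hbx | hb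
        · exact hbx ▸ hQ x y hcmp
        · exact hy b hb
      · refine List.pairwise_cons.2 ⟨?_, ih (y :: t) h'⟩
        intro b hb
        rw [(pvBPass_perm f k (y :: t)).mem_iff] at hb
        simp only [List.mem_cons] at hb
        rcases hb with hby | hb
        · exact hby ▸ hx y (by simp)
        · exact hx b (by simp [hb])

theorem pvBPass_length {α : Type} (f : α → Int) (k : Nat) (l : List α) :
    (pvBPass f k l).length = l.length := (pvBPass_perm f k l).length_eq

theorem pvGood_transfer {α : Type} (f : α → Int) (m : Nat) (l : List α) (hm : m + 1 < l.length)
    (h1 : (l.drop (m+2)).Pairwise (fun a b => f a ≤ f b))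
    (h2 : ∀ a ∈ l.take (m+2), ∀ b ∈ l.drop (m+2), f a ≤ f b) :
    ((pvBPass f (m+1) l).drop (m+1)).Pairwise (fun a b => f a ≤ f b) ∧
      ∀ a ∈ (pvBPass f (m+1) l).take (m+1), ∀ b ∈ (pvBPass f (m+1) l).drop (m+1), f a ≤ f b := by
  have htne : l.take (m+2) ≠ [] := by
    have : (l.take (m+2)).length = m+2 := by
      rw [List.length_take]; omega
    intro h; rw [h] at this; simp at this
  have htlen : (l.take (m+2)).length ≤ (m+1) + 1 := by
    rw [List.length_take]; omega
  obtain ⟨q, mx, heq, hall⟩ := pvBPass_last f (m+1) (l.take (m+2)) htne htlen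
  have hqlen : q.length = m + 1 := by
    have := pvBPass_length f (m+1) (l.take (m+2))
    rw [heq] at this
    simp [List.length_take] at this ⊢
    omega
  have hsplit : pvBPass f (m+1) l = q ++ ([mx] ++ l.drop (m+2)) := by
    rw [pvBPass_split f (m+1) l, heq, List.append_assoc]
  have hmxmem : mx ∈ l.take (m+2) := by
    have : mx ∈ pvBPass f (m+1) (l.take (m+2)) := by rw [heq]; simp
    exact (pvBPass_perm f (m+1) (l.take (m+2))).mem_iff.1 this
  have hdrop : (pvBPass f (m+1) l).drop (m+1) = mx :: l.drop (m+2) := by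
    rw [hsplit, ← hqlen, List.drop_left]; rfl
  have htake : (pvBPass f (m+1) l).take (m+1) = q := by
    rw [hsplit, ← hqlen, List.take_left]
  constructor
  · rw [hdrop]
    refine List.pairwise_cons.2 ⟨fun b hb => h2 mx hmxmem b hb, h1⟩
  · intro a ha b hb
    rw [htake] at ha
    have hamem : a ∈ l.take (m+2) := by
      have : a ∈ pvBPass f (m+1) (l.take (m+2)) := by rw [heq]; exact List.mem_append_left _ ha
      exact (pvBPass_perm f (m+1) (l.take (m+2))).mem_iff.1 this
    rw [hdrop] at hb
    rcases List.mem_cons.1 hb with hbm | hb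
    · exact hbm ▸ hall a hamem
    · exact h2 a hamem b hb

theorem pvGo_good {α : Type} (f : α → Int) : ∀ (m : Nat) (l : List α), m < l.length →
    (l.drop (m+1)).Pairwise (fun a b => f a ≤ f b) →
    (∀ a ∈ l.take (m+1), ∀ b ∈ l.drop (m+1), f a ≤ f b) →
    (pvGo f m l).Pairwise (fun a b => f a ≤ f b) := by
  intro m
  induction m with
  | zero =>
    intro l hlen h1 h2
    match l with
    | x :: t =>
      refine List.pairwise_cons.2 ⟨fun b hb => h2 x (by simp) b (by simpa using hb), by simpa using h1⟩
  | succ m ih =>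
    intro l hlen h1 h2
    obtain ⟨g1, g2⟩ := pvGood_transfer f m l hlen h1 h2
    exact ih (pvBPass f (m+1) l) (by rw [pvBPass_length]; omega) g1 g2

theorem pvGo_sorted_le {α : Type} (f : α → Int) (l : List α) :
    (pvGo f (l.length - 1) l).Pairwise (fun a b => f a ≤ f b) := by
  match l with
  | [] => exact List.Pairwise.nil
  | x :: t =>
    apply pvGo_good f ((x :: t).length - 1) (x :: t) (by simp)
    · simp
    · simp

theorem pvInsertBy_pairwise {α : Type} (f : α → Int) (x : α × Nat) :
    ∀ (acc : List (α × Nat)),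
    acc.Pairwise (fun a b => f a.1 < f b.1 ∨ (f a.1 = f b.1 ∧ a.2 < b.2)) →
    (∀ p ∈ acc, p.2 < x.2) →
    (PySem.List.insertBy (fun a b => decide (f a.1 < f b.1)) x acc).Pairwise
      (fun a b => f a.1 < f b.1 ∨ (f a.1 = f b.1 ∧ a.2 < b.2)) := by
  intro acc
  induction acc with
  | nil => intro _ _; simp [PySem.List.insertBy]
  | cons y ys ih =>
    intro hR hidx
    rw [PySem.List.insertBy]
    rcases List.pairwise_cons.1 hR with ⟨hy, hys⟩
    split_ifs with hcmp
    · simp only [decide_eq_true_eq] at hcmp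
      refine List.pairwise_cons.2 ⟨?_, hR⟩
      intro b hb
      rcases List.mem_cons.1 hb with hby | hb
      · exact Or.inl (hby ▸ hcmp)
      · rcases hy b hb with h | ⟨he, _⟩
        · exact Or.inl (lt_trans hcmp h)
        · exact Or.inl (he ▸ hcmp)
    · simp only [decide_eq_true_eq] at hcmp
      refine List.pairwise_cons.2 ⟨?_, ih hys (fun p hp => hidx p (by simp [hp]))⟩
      intro b hb
      rw [PySem.List.mem_insertBy] at hb
      rcases hb with rfl | hb
      · rcases lt_or_eq_of_le (not_lt.1 hcmp) with h | h
        · exact Or.inl h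
        · exact Or.inr ⟨h, hidx y (by simp)⟩
      · exact hy b hb

theorem pvFoldl_insertBy_pairwise {α : Type} (f : α → Int) :
    ∀ (xs acc : List (α × Nat)),
    xs.Pairwise (fun a b => a.2 < b.2) →
    (∀ p ∈ acc, ∀ q ∈ xs, p.2 < q.2) →
    acc.Pairwise (fun a b => f a.1 < f b.1 ∨ (f a.1 = f b.1 ∧ a.2 < b.2)) →
    (xs.foldl (fun acc x => PySem.List.insertBy (fun a b => decide (f a.1 < f b.1)) x acc) acc).Pairwise
      (fun a b => f a.1 < f b.1 ∨ (f a.1 = f b.1 ∧ a.2 < b.2)) := by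
  intro xs
  induction xs with
  | nil => intro acc _ _ hR; exact hR
  | cons x xs ih =>
    intro acc hsnd hlt hR
    rcases List.pairwise_cons.1 hsnd with ⟨hx, hxs⟩
    apply ih _ hxs
    · intro p hp q hq
      rw [PySem.List.mem_insertBy] at hp
      rcases hp with rfl | hp
      · exact hx q hq
      · exact hlt p hp q (by simp [hq])
    · exact pvInsertBy_pairwise f x acc hR (fun p hp => hlt p hp x (by simp))

theorem pvInsertBy_map_fst {α : Type} (f : α → Int) (x : α × Nat) : ∀ (ys : List (α × Nat)),
    (PySem.List.insertBy (fun a b => decide (f a.1 < f b.1)) x ys).map Prod.fst =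
      PySem.List.insertBy (fun a b => decide (f a < f b)) x.1 (ys.map Prod.fst) := by
  intro ys
  induction ys with
  | nil => simp [PySem.List.insertBy]
  | cons y ys ih =>
    rw [List.map_cons, PySem.List.insertBy, PySem.List.insertBy]
    split_ifs with h
    · simp
    · simp [ih]

theorem pvSorted_map_fst {α : Type} (f : α → Int) (l : List (α × Nat)) :
    (PySem.List.sorted l (fun p => f p.1) false).map Prod.fst =
      PySem.List.sorted (l.map Prod.fst) f false := by
  rw [PySem.List.sorted_eq_foldl_insertBy, PySem.List.sorted_eq_foldl_insertBy]
  suffices h : ∀ (xs : List (α × Nat)) (acc : List (α × Nat)),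
      (xs.foldl (fun acc x => PySem.List.insertBy (fun a b => decide (f a.1 < f b.1)) x acc) acc).map Prod.fst =
        (xs.map Prod.fst).foldl (fun acc x => PySem.List.insertBy (fun a b => decide (f a < f b)) x acc) (acc.map Prod.fst) by
    exact h l []
  intro xs
  induction xs with
  | nil => intro acc; rfl
  | cons x xs ih =>
    intro acc
    rw [List.foldl_cons, List.map_cons, List.foldl_cons, ih, pvInsertBy_map_fst]

theorem pvBPass_map_fst {α : Type} (f : α → Int) : ∀ (k : Nat) (l : List (α × Nat)),
    (pvBPass (fun p => f p.1) k l).map Prod.fst = pvBPass f k (l.map Prod.fst) := by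
  intro k
  induction k with
  | zero => intro l; rfl
  | succ k ih =>
    intro l
    match l with
    | [] => rfl
    | [x] => rfl
    | x :: y :: t =>
      rw [pvBPass, List.map_cons, List.map_cons, pvBPass]
      split_ifs with h
      · rw [List.map_cons, ih]; rfl
      · rw [List.map_cons, ih]; rfl

theorem pvZipIdx_pairwise_snd {α : Type} : ∀ (l : List α) (n : Nat),
    (l.zipIdx n).Pairwise (fun a b => a.2 < b.2) := by
  intro l
  induction l with
  | nil => intro n; simp
  | cons x t ih =>
    intro n
    rw [List.zipIdx_cons]
    refine List.pairwise_cons.2 ⟨?_, ih (n+1)⟩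
    rintro ⟨b, i⟩ hb
    have := List.mem_zipIdx hb
    simp only
    omega

theorem pvGo_perm {α : Type} (f : α → Int) : ∀ (m : Nat) (l : List α), (pvGo f m l).Perm l := by
  intro m
  induction m with
  | zero => intro l; exact List.Perm.refl l
  | succ m ih => intro l; exact (ih _).trans (pvBPass_perm f (m+1) l)

theorem pvGo_pairwise {α : Type} (f : α → Int) {Q : α → α → Prop}
    (hQ : ∀ a b, f b < f a → Q b a) : ∀ (m : Nat) (l : List α),
    l.Pairwise Q → (pvGo f m l).Pairwise Q := by
  intro m
  induction m with
  | zero => intro l h; exact h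
  | succ m ih => intro l h; exact ih _ (pvBPass_pairwise f hQ (m+1) l h)

theorem pvGo_map_fst {α : Type} (f : α → Int) : ∀ (m : Nat) (l : List (α × Nat)),
    (pvGo (fun p => f p.1) m l).map Prod.fst = pvGo f m (l.map Prod.fst) := by
  intro m
  induction m with
  | zero => intro l; rfl
  | succ m ih =>
      intro l
      show (pvGo (fun p => f p.1) m (pvBPass (fun p => f p.1) (m+1) l)).map Prod.fst = _
      rw [ih, pvBPass_map_fst]
      rfl

theorem pvBubble_eq_sorted {α : Type} (f : α → Int) (l : List α) :
    pvGo f (l.length - 1) l = PySem.List.sorted l f false := by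
  have hmapA : (l.zipIdx).map Prod.fst = l := List.zipIdx_map_fst 0 l
  have hlenA : (l.zipIdx).length = l.length := List.length_zipIdx
  have hle : (pvGo (fun p : α × Nat => f p.1) (l.zipIdx.length - 1) l.zipIdx).Pairwise
      (fun a b => f a.1 ≤ f b.1) := pvGo_sorted_le _ _
  have hst : (pvGo (fun p : α × Nat => f p.1) (l.zipIdx.length - 1) l.zipIdx).Pairwise
      (fun a b => f a.1 = f b.1 → a.2 < b.2) := by
    apply pvGo_pairwise _ (fun a b hlt' heq => absurd heq (ne_of_lt hlt'))
    exact (pvZipIdx_pairwise_snd l 0).imp (fun h => fun _ => h)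
  have hbR : (pvGo (fun p : α × Nat => f p.1) (l.zipIdx.length - 1) l.zipIdx).Pairwise
      (fun a b => f a.1 < f b.1 ∨ (f a.1 = f b.1 ∧ a.2 < b.2)) := by
    refine (hle.and hst).imp ?_
    rintro a b ⟨h1, h2⟩
    rcases lt_or_eq_of_le h1 with h | h
    · exact Or.inl h
    · exact Or.inr ⟨h, h2 h⟩
  have hsR : (PySem.List.sorted l.zipIdx (fun p : α × Nat => f p.1) false).Pairwise
      (fun a b => f a.1 < f b.1 ∨ (f a.1 = f b.1 ∧ a.2 < b.2)) := by
    rw [PySem.List.sorted_eq_foldl_insertBy]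
    exact pvFoldl_insertBy_pairwise f l.zipIdx [] (pvZipIdx_pairwise_snd l 0) (by simp) (by simp)
  have hperm : (pvGo (fun p : α × Nat => f p.1) (l.zipIdx.length - 1) l.zipIdx).Perm
      (PySem.List.sorted l.zipIdx (fun p : α × Nat => f p.1) false) :=
    (pvGo_perm _ _ _).trans (PySem.List.sorted_perm _ _ _).symm
  have hkey : pvGo (fun p : α × Nat => f p.1) (l.zipIdx.length - 1) l.zipIdx =
      PySem.List.sorted l.zipIdx (fun p : α × Nat => f p.1) false := by
    refine List.Perm.eq_of_pairwise ?_ hbR hsR hperm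
    intro a b _ _ h1 h2
    exfalso
    rcases h1 with h1 | ⟨e1, i1⟩ <;> rcases h2 with h2 | ⟨e2, i2⟩ <;> omega
  have h := congrArg (List.map Prod.fst) hkey
  rw [pvGo_map_fst, pvSorted_map_fst, hmapA, hlenA] at h
  exact h

-- ===== VERDICT (by name: the statement is the Claim_ definition above) =====
theorem sortEntries_spec : Claim_equal_sortEntries := by
  intro entries _
  unfold Spec_sortEntries sortEntries sortEntries_alt
  rw [PySem.List.foldl_append_singleton_eq_map (fun kv : String × Int => [kv.1, PySem.Int.toStr kv.2]) entries []]
  simp only [List.nil_append]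
  exact pvBubble_eq_sorted pvKeyA _
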